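-- pv_equiv track=rewrite | github.com/pypi-data/pypi-mirror-403 | packages/gseagui/gseagui-0.1.9-py3-none-any.whl/gseagui/gsea_res_ploter.py | _get_sort_candidates
-- ===== SOURCE A (Python) =====
-- def _get_sort_candidates(columns: list[str]) -> list[str]:
--     # 额外提供两个派生字段，方便 Hypergeometric 结果排序
--     base = [c for c in columns]
--     extra = ["Overlap (k)", "Gene Ratio (k/n)"]
--     # 保持顺序：常见列靠前
--     preferred = ["Adjusted P-value", "P-value", "Odds Ratio", "Combined Score", "Overlap", "Gene_set", "Term"]
--     ordered: list[str] = []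
--     for p in preferred:
--         for c in base:
--             if c == p and c not in ordered:
--                 ordered.append(c)
--     for c in base:
--         if c not in ordered:
--             ordered.append(c)
--     ordered.extend(extra)
--     return ordered
-- ===== SOURCE B (Python) =====
-- def _get_sort_candidates(columns: list[str]) -> list[str]:
--     # One-pass bucket sort: each first-seen column goes into the bucket of its
--     # preferred rank (overflow bucket keeps first-occurrence order), then the
--     # buckets (plus the two derived fields) are concatenated.
--     preferred = ["Adjusted P-value", "P-value", "Odds Ratio", "Combined Score", "Overlap", "Gene_set", "Term"]
--     priority = {p: i for i, p in enumerate(preferred)}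
--     buckets = [[] for _ in range(len(preferred) + 1)]
--     seen = set()
--     for c in columns:
--         if c not in seen:
--             seen.add(c)
--             buckets[priority.get(c, len(preferred))].append(c)
--     buckets.append(["Overlap (k)", "Gene Ratio (k/n)"])
--     return [c for b in buckets for c in b]
-- ===== Notes on version B (the rewrite author's own statement) =====
-- stated objective: faster
-- what changed: Replaces A's nested preferred-by-base scans and list-membership dedup with a one-pass bucket sort: a priority dict maps each preferred name to its rank, a single scan over columns drops repeats via a seen-set and appends each new name to the bucket of its rank (overflow bucket preserves input order), and the buckets are concatenated.
import Mathlib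
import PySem

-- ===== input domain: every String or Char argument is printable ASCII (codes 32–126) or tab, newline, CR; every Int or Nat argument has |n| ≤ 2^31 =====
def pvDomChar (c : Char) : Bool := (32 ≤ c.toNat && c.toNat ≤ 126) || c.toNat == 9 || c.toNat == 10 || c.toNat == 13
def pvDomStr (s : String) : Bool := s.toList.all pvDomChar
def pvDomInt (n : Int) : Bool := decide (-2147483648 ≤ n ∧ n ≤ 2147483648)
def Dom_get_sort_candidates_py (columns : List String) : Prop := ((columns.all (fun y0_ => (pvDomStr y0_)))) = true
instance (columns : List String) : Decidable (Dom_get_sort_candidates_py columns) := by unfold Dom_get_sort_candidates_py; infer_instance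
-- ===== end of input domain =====

-- B replaces A's nested preferred×base scans and list-membership dedup by a one-pass bucket sort
-- (priority dict + per-rank buckets filled in a single scan), a different, measurably faster algorithm.

-- ===== PORT A =====
def get_sort_candidates_py (columns : List String) : List String :=
  let base := columns.map (fun c => c)
  let extra := ["Overlap (k)", "Gene Ratio (k/n)"]
  let preferred := ["Adjusted P-value", "P-value", "Odds Ratio", "Combined Score", "Overlap", "Gene_set", "Term"]
  let ordered : List String := []
  let ordered := preferred.foldl (fun ordered p =>
    base.foldl (fun ordered c =>
      if c == p && !ordered.contains c then ordered ++ [c] else ordered) ordered) ordered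
  let ordered := base.foldl (fun ordered c =>
    if !ordered.contains c then ordered ++ [c] else ordered) ordered
  ordered ++ extra

-- ===== PORT B =====
-- Transliteration of Source B: priority = {p: i for i, p in enumerate(preferred)};
-- buckets = [[] for _ in range(len(preferred)+1)]; one pass over columns with a seen-set,
-- buckets[priority.get(c, len(preferred))].append(c) ported as pyGetD + pySetD (the index is
-- always in range 0..7, where both are exact); finally the flattening comprehension.
def get_sort_candidates_py_alt (columns : List String) : List String :=
  let preferred := ["Adjusted P-value", "P-value", "Odds Ratio", "Combined Score", "Overlap", "Gene_set", "Term"]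
  let priority : PySem.Dict String Int :=
    (PySem.List.enumerate preferred 0).foldl (fun d ip => d.insert ip.2 ip.1) PySem.Dict.empty
  let buckets : List (List String) :=
    (PySem.List.pyRange 0 ((preferred.length : Int) + 1) 1).map (fun _ => ([] : List String))
  let st := columns.foldl (fun (st : PySem.Set String × List (List String)) c =>
      if PySem.Set.contains st.1 c then st
      else
        let i := priority.getD c (preferred.length : Int)
        (PySem.Set.add st.1 c,
         PySem.List.pySetD st.2 i (PySem.List.pyGetD st.2 i [] ++ [c])))
    (PySem.Set.empty, buckets)
  let buckets := st.2 ++ [["Overlap (k)", "Gene Ratio (k/n)"]]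
  buckets.flatMap (fun b => b)

-- ===== PRECONDITION & SPEC =====
def Spec_get_sort_candidates_py (columns : List String) (out : List String) : Prop := out = get_sort_candidates_py_alt columns
instance (columns : List String) (out : List String) : Decidable (Spec_get_sort_candidates_py columns out) := by unfold Spec_get_sort_candidates_py; infer_instance

-- ===== CLAIM (what is proved, stated in full; the proofs are below) =====
def Claim_equal_get_sort_candidates_py : Prop := ∀ (columns : List String), Dom_get_sort_candidates_py columns → Spec_get_sort_candidates_py columns (get_sort_candidates_py columns)

-- ===== LEMMAS AND PROOFS =====

-- the fixed preferred list and extras, for the proofs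
def pvP : List String := ["Adjusted P-value", "P-value", "Odds Ratio", "Combined Score", "Overlap", "Gene_set", "Term"]
def pvExtra : List String := ["Overlap (k)", "Gene Ratio (k/n)"]

-- the priority of a column name: rank in pvP, or 7
def pvKey (c : String) : Int :=
  if c = "Adjusted P-value" then 0 else if c = "P-value" then 1 else if c = "Odds Ratio" then 2
  else if c = "Combined Score" then 3 else if c = "Overlap" then 4 else if c = "Gene_set" then 5
  else if c = "Term" then 6 else 7

-- bucket j of a prefix l of the input
def pvBk (j : Int) (l : List String) : List String :=
  (PySem.Set.ofList l).filter (fun c => pvKey c = j)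

def pvBuckets (l : List String) : List (List String) :=
  [pvBk 0 l, pvBk 1 l, pvBk 2 l, pvBk 3 l, pvBk 4 l, pvBk 5 l, pvBk 6 l, pvBk 7 l]

-- B's concrete priority dict looks up pvKey
theorem pv_getD_eq (c : String) :
    ((PySem.List.enumerate ["Adjusted P-value", "P-value", "Odds Ratio", "Combined Score", "Overlap", "Gene_set", "Term"] 0).foldl (fun d ip => d.insert ip.2 ip.1)
      PySem.Dict.empty).getD c ((List.length ["Adjusted P-value", "P-value", "Odds Ratio", "Combined Score", "Overlap", "Gene_set", "Term"] : Int)) = pvKey c := by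
  have hD : ((PySem.List.enumerate ["Adjusted P-value", "P-value", "Odds Ratio", "Combined Score", "Overlap", "Gene_set", "Term"] 0).foldl (fun d ip => d.insert ip.2 ip.1)
      PySem.Dict.empty)
      = PySem.Dict.mk [("Adjusted P-value", 0), ("P-value", 1), ("Odds Ratio", 2),
          ("Combined Score", 3), ("Overlap", 4), ("Gene_set", 5), ("Term", 6)] := by decide
  rw [hD]
  show PySem.Dict.getD _ c ((7 : Nat) : Int) = pvKey c
  unfold pvKey
  simp only [PySem.Dict.getD, PySem.Dict.get?_mk_cons]
  split_ifs <;> simp_all <;> rfl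

theorem pv_key_bounds (c : String) : 0 ≤ pvKey c ∧ pvKey c ≤ 7 := by
  unfold pvKey; split_ifs <;> omega

theorem pv_ofList_append_mem {l : List String} {c : String} (h : c ∈ l) :
    PySem.Set.ofList (l ++ [c]) = PySem.Set.ofList l := by
  rw [PySem.Set.ofList_eq_foldl, PySem.Set.ofList_eq_foldl, List.foldl_append]
  simp only [List.foldl_cons, List.foldl_nil, PySem.Set.add]
  rw [if_pos]
  rw [PySem.Set.contains_eq_listContains, List.contains_iff_mem]
  rw [← PySem.Set.ofList_eq_foldl, PySem.Set.mem_ofList]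
  exact h

theorem pv_ofList_append_not_mem {l : List String} {c : String} (h : c ∉ l) :
    PySem.Set.ofList (l ++ [c]) = PySem.Set.ofList l ++ [c] := by
  rw [PySem.Set.ofList_eq_foldl, PySem.Set.ofList_eq_foldl, List.foldl_append]
  simp only [List.foldl_cons, List.foldl_nil, PySem.Set.add]
  rw [if_neg]
  rw [PySem.Set.contains_eq_listContains, List.contains_iff_mem]
  rw [← PySem.Set.ofList_eq_foldl, PySem.Set.mem_ofList]
  exact h

-- the single-pass loop maintains (seen-set, buckets)
theorem pv_fold_inv (l : List String) :
    l.foldl (fun (st : PySem.Set String × List (List String)) c =>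
      if PySem.Set.contains st.1 c then st
      else (PySem.Set.add st.1 c,
            PySem.List.pySetD st.2 (pvKey c) (PySem.List.pyGetD st.2 (pvKey c) [] ++ [c])))
      (PySem.Set.empty, pvBuckets []) = (PySem.Set.ofList l, pvBuckets l) := by
  induction l using List.reverseRecOn with
  | nil => rfl
  | append_singleton l c ih =>
    rw [List.foldl_append, ih]
    simp only [List.foldl_cons, List.foldl_nil]
    by_cases hc : c ∈ l
    · rw [if_pos (by
        rw [PySem.Set.contains_eq_listContains, List.contains_iff_mem, PySem.Set.mem_ofList]
        exact hc)]
      simp only [pvBuckets, pvBk, pv_ofList_append_mem hc]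
    · have hcon : PySem.Set.contains (PySem.Set.ofList l) c = false := by
        rw [PySem.Set.contains_eq_listContains, Bool.eq_false_iff]
        intro h
        exact hc ((PySem.Set.mem_ofList _ _).mp (List.contains_iff_mem.mp h))
      rw [if_neg (by rw [hcon]; exact Bool.false_ne_true)]
      have hadd : PySem.Set.add (PySem.Set.ofList l) c = PySem.Set.ofList l ++ [c] := by
        unfold PySem.Set.add
        rw [hcon]
        rfl
      have hk := pv_key_bounds c
      have h8 : pvKey c = 0 ∨ pvKey c = 1 ∨ pvKey c = 2 ∨ pvKey c = 3 ∨ pvKey c = 4 ∨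
          pvKey c = 5 ∨ pvKey c = 6 ∨ pvKey c = 7 := by omega
      rcases h8 with h|h|h|h|h|h|h|h <;>
        rw [h] <;>
        simp [pvBuckets, hadd, PySem.List.pySetD_of_nonneg, pvBk,
          pv_ofList_append_not_mem hc, List.filter_append, h, List.set,
          PySem.List.pyGetD, PySem.List.pyIdx?, PySem.List.pyGet?]

-- filtering a duplicate-free list for a single value
theorem pv_filter_single (p : String) (d : List String) (hd : d.Nodup) :
    d.filter (fun c => c == p) = if p ∈ d then [p] else [] := by
  induction d with
  | nil => simp
  | cons x t ih =>
    have hnd := (List.nodup_cons.mp hd)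
    rw [List.filter_cons]
    by_cases hx : x = p
    · subst hx
      rw [if_pos (by simp), ih hnd.2, if_neg hnd.1, if_pos List.mem_cons_self]
    · rw [if_neg (by simp [hx]), ih hnd.2]
      have hxp : ¬ p = x := fun h => hx h.symm
      by_cases hm : p ∈ t <;> simp [hm, hxp, List.mem_cons]

-- ===== A-side characterization (as in the nested-scan reading of A) =====

theorem pv_inner_loop (base : List String) (p : String) (od : List String) :
    base.foldl (fun ordered c =>
      if c == p && !ordered.contains c then ordered ++ [c] else ordered) od
    = if p ∈ od then od else if p ∈ base then od ++ [p] else od := by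
  induction base generalizing od with
  | nil => simp
  | cons c t ih =>
    rw [List.foldl_cons]
    by_cases hc : c = p
    · subst hc
      by_cases hm : c ∈ od
      · rw [if_neg (by simp [hm]), ih]
        simp [hm]
      · rw [if_pos (by simp [hm]), ih]
        simp [hm, List.mem_append]
    · rw [if_neg (by simp [hc]), ih]
      have hpc : ¬ p = c := fun h => hc h.symm
      by_cases h1 : p ∈ od <;> by_cases h2 : p ∈ t <;>
        simp [h1, h2, hpc, List.mem_cons]

theorem pv_outer_loop (ps : List String) (base od : List String) (hnd : ps.Nodup)
    (hdisj : ∀ p ∈ ps, p ∉ od) :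
    ps.foldl (fun ordered p =>
      base.foldl (fun ordered c =>
        if c == p && !ordered.contains c then ordered ++ [c] else ordered) ordered) od
    = od ++ ps.filter (fun p => base.contains p) := by
  induction ps generalizing od with
  | nil => simp
  | cons p t ih =>
    have hpod : p ∉ od := hdisj p (List.mem_cons_self)
    have hnd' : t.Nodup := hnd.of_cons
    have hpt : p ∉ t := (List.nodup_cons.mp hnd).1
    rw [List.foldl_cons, pv_inner_loop, if_neg hpod]
    by_cases hb : p ∈ base
    · rw [if_pos hb, ih (od ++ [p]) hnd' (fun q hq => by
        simp only [List.mem_append, List.mem_singleton]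
        rintro (h | rfl)
        · exact hdisj q (List.mem_cons_of_mem _ hq) h
        · exact hpt hq)]
      simp [hb, List.append_assoc]
    · rw [if_neg hb, ih od hnd' (fun q hq => hdisj q (List.mem_cons_of_mem _ hq))]
      simp [hb]

theorem pv_dedup_loop (base od : List String) :
    base.foldl (fun ordered c =>
      if !ordered.contains c then ordered ++ [c] else ordered) od
    = od ++ (PySem.Set.ofList base).filter (fun c => !od.contains c) := by
  have hd : ∀ (s : List String) (x : String),
      PySem.Set.discard s x = s.filter (fun y => y != x) := fun _ _ => rfl
  induction base generalizing od with
  | nil => simp [PySem.Set.ofList_nil]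
  | cons c t ih =>
    rw [PySem.Set.ofList_cons, List.foldl_cons]
    by_cases hm : c ∈ od
    · rw [if_neg (by simp [hm]), ih, List.filter_cons, if_neg (by simp [hm]), hd,
        List.filter_filter]
      congr 1
      apply List.filter_congr
      intro x _
      by_cases hx : x ∈ od
      · simp [hx]
      · have hxc : x ≠ c := fun h => hx (h ▸ hm)
        simp [hx, hxc]
    · rw [if_pos (by simp [hm]), ih, List.filter_cons, if_pos (by simp [hm]), hd,
        List.filter_filter, List.append_assoc]
      congr 1
      rw [List.singleton_append]
      congr 1
      apply List.filter_congr
      intro x _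
      by_cases hx : x = c
      · simp [hx]
      · by_cases ho : x ∈ od <;> simp [ho, hx, List.mem_append]

theorem pv_A_char (columns : List String) :
    get_sort_candidates_py columns
    = pvP.filter (fun p => columns.contains p)
      ++ (PySem.Set.ofList columns).filter (fun c => !pvP.contains c) ++ pvExtra := by
  unfold get_sort_candidates_py
  simp only [List.map_id_fun', id]
  rw [pv_outer_loop _ _ _ (by decide) (by simp), pv_dedup_loop, List.nil_append]
  unfold pvP pvExtra
  congr 1
  congr 1
  apply List.filter_congr
  intro c hc
  have hcc : c ∈ columns := (PySem.Set.mem_ofList _ _).mp hc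
  by_cases hp : c ∈ (["Adjusted P-value", "P-value", "Odds Ratio", "Combined Score",
      "Overlap", "Gene_set", "Term"] : List String)
  · simp [List.mem_filter, hp, hcc]
  · simp [List.mem_filter, hp]

-- ===== B-side characterization =====

theorem pv_B_char (columns : List String) :
    get_sort_candidates_py_alt columns
    = pvBk 0 columns ++ pvBk 1 columns ++ pvBk 2 columns ++ pvBk 3 columns
      ++ pvBk 4 columns ++ pvBk 5 columns ++ pvBk 6 columns ++ pvBk 7 columns ++ pvExtra := by
  simp only [get_sort_candidates_py_alt, pv_getD_eq]
  rw [show ((PySem.List.pyRange 0 ((List.length ["Adjusted P-value", "P-value", "Odds Ratio", "Combined Score", "Overlap", "Gene_set", "Term"] : Int) + 1) 1).map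
      (fun _ => ([] : List String))) = pvBuckets [] from by decide]
  rw [pv_fold_inv columns]
  simp [pvBuckets, pvExtra, List.flatMap]

-- a bucket j < 7 holds exactly the preferred name of rank j, if present
theorem pv_bk_lit (p : String) (j : Int) (hpj : ∀ c, pvKey c = j ↔ c = p)
    (columns : List String) :
    pvBk j columns = if p ∈ columns then [p] else [] := by
  unfold pvBk
  rw [List.filter_congr (fun c _ => show (decide (pvKey c = j)) = (c == p) by
        rw [Bool.eq_iff_iff]; simp [hpj c, beq_iff_eq])]
  rw [pv_filter_single p _ (PySem.Set.nodup_ofList _)]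
  simp [PySem.Set.mem_ofList]

-- the first seven buckets, concatenated, are A's preferred head
theorem pv_head_eq (columns : List String) :
    pvBk 0 columns ++ pvBk 1 columns ++ pvBk 2 columns ++ pvBk 3 columns
      ++ pvBk 4 columns ++ pvBk 5 columns ++ pvBk 6 columns
    = pvP.filter (fun p => columns.contains p) := by
  rw [pv_bk_lit "Adjusted P-value" 0 (fun c => by unfold pvKey; split_ifs <;> simp_all),
      pv_bk_lit "P-value" 1 (fun c => by unfold pvKey; split_ifs <;> simp_all),
      pv_bk_lit "Odds Ratio" 2 (fun c => by unfold pvKey; split_ifs <;> simp_all),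
      pv_bk_lit "Combined Score" 3 (fun c => by unfold pvKey; split_ifs <;> simp_all),
      pv_bk_lit "Overlap" 4 (fun c => by unfold pvKey; split_ifs <;> simp_all),
      pv_bk_lit "Gene_set" 5 (fun c => by unfold pvKey; split_ifs <;> simp_all),
      pv_bk_lit "Term" 6 (fun c => by unfold pvKey; split_ifs <;> simp_all)]
  have single : ∀ p : String, (if p ∈ columns then [p] else [])
      = List.filter (fun q => columns.contains q) [p] := by
    intro p
    by_cases h : p ∈ columns <;> simp [h, List.filter]
  simp only [single, ← List.filter_append]
  rfl

theorem pv_bk7 (columns : List String) :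
    pvBk 7 columns = (PySem.Set.ofList columns).filter (fun c => !pvP.contains c) := by
  unfold pvBk
  apply List.filter_congr
  intro c _
  unfold pvKey pvP
  split_ifs with h0 h1 h2 h3 h4 h5 h6 <;> simp_all

-- ===== VERDICT (by name: the statement is the Claim_ definition above) =====
theorem get_sort_candidates_py_spec : Claim_equal_get_sort_candidates_py := by
  intro columns _
  unfold Spec_get_sort_candidates_py
  rw [pv_A_char, pv_B_char, pv_bk7, pv_head_eq]
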